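-- pv_equiv track=rewrite | github.com/posl/comment_recommendation | script/mod_gen/4_time/en/195_D/8.py | get_max_value_baggage
-- ===== SOURCE A (Python) =====
-- def get_max_value_baggage(baggage, boxes):
--     #sort by weight so that we can use binary search
--     baggage = sorted(baggage, key=lambda x: x[0])
--     boxes = sorted(boxes)
--     #dp[i][j] is the maximum value we can get by using the first i baggage and j boxes
--     dp = [[0 for _ in range(len(boxes) + 1)] for _ in range(len(baggage) + 1)]
--     for i in range(1, len(baggage) + 1):
--         for j in range(1, len(boxes) + 1):
--             #if the current box can hold the current baggage
--             if boxes[j - 1] >= baggage[i - 1][0]: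
--                 #we can either put the current baggage in the current box or not
--                 dp[i][j] = max(dp[i - 1][j], dp[i - 1][j - 1] + baggage[i - 1][1])
--             else:
--                 #we can't put the current baggage in the current box
--                 dp[i][j] = dp[i - 1][j]
--     return dp[-1][-1]
-- ===== SOURCE B (Python) =====
-- def get_max_value_baggage(baggage, boxes):
--     # Greedy matching instead of a DP table: scan boxes from smallest to largest;
--     # each box takes the most valuable remaining item that fits (if its value is
--     # positive).  Correct because feasible item sets form a transversal matroid
--     # with nested neighbourhoods: the smallest box restricts choice the most, and
--     # an exchange argument shows taking its best fitting item is always optimal.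
--     items = list(baggage)
--     total = 0
--     for c in sorted(boxes):
--         best = None
--         for it in items:
--             if it[0] <= c and (best is None or it[1] > best[1]):
--                 best = it
--         if best is not None and best[1] > 0:
--             total += best[1]
--             items.remove(best)
--     return total
-- ===== Notes on version B (the rewrite author's own statement) =====
-- stated objective: faster
-- what changed: B replaces A's (n+1)x(m+1) dynamic-programming table by a greedy matching: boxes are processed from smallest to largest and each box takes the most valuable remaining fitting item (if positive), correct by a matroid exchange argument.
import Mathlib
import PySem

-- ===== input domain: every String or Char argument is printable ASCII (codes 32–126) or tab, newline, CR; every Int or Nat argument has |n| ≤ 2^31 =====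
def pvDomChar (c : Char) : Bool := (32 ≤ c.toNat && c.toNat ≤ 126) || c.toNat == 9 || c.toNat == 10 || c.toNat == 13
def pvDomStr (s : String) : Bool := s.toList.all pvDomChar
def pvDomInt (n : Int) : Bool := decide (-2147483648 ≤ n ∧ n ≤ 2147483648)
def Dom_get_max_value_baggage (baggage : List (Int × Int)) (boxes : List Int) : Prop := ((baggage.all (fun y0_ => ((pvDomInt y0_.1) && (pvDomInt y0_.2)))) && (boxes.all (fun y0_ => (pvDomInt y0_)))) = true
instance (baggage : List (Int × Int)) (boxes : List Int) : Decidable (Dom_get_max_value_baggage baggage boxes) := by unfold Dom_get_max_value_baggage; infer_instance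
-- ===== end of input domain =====

-- B replaces A's (n+1)×(m+1) DP table by a greedy matching (smallest box first takes the most
-- valuable remaining fitting item), correct by a matroid exchange argument; measurably faster.

-- ===== PORT A =====
-- body of A's inner loop: reads dp[i-1][*], baggage[i-1], boxes[j-1], writes dp[i][j]
def aStep (bg : List (Int × Int)) (bx : List Int) (dp : List (List Int)) (i j : Int) : List (List Int) :=
  let prow := PySem.List.pyGetD dp (i - 1) []
  let wv := PySem.List.pyGetD bg (i - 1) ((0 : Int), (0 : Int))
  let c := PySem.List.pyGetD bx (j - 1) 0
  let val := if c ≥ wv.1 then max (PySem.List.pyGetD prow j 0) (PySem.List.pyGetD prow (j - 1) 0 + wv.2)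
             else PySem.List.pyGetD prow j 0
  PySem.List.pySetD dp i (PySem.List.pySetD (PySem.List.pyGetD dp i []) j val)

-- A's table: zero table, then the two nested `for … in range(1, … + 1)` loops
def aTable (bg : List (Int × Int)) (bx : List Int) : List (List Int) :=
  let n : Int := PySem.List.len bg
  let m : Int := PySem.List.len bx
  let dp0 : List (List Int) :=
    (PySem.List.pyRange 0 (n + 1) 1).map (fun _ => (PySem.List.pyRange 0 (m + 1) 1).map (fun _ => (0 : Int)))
  (PySem.List.pyRange 1 (n + 1) 1).foldl (fun dp i =>
    (PySem.List.pyRange 1 (m + 1) 1).foldl (fun dp j => aStep bg bx dp i j) dp) dp0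

def get_max_value_baggage (baggage : List (Int × Int)) (boxes : List Int) : Int :=
  let bg := PySem.List.sorted baggage (fun x => x.1) false
  let bx := PySem.List.sorted boxes (fun x => x) false
  let dp := aTable bg bx
  PySem.List.pyGetD (PySem.List.pyGetD dp (-1) []) (-1) 0

-- ===== PORT B =====
-- B's inner scan: `if it[0] <= c and (best is None or it[1] > best[1]): best = it`
def bBestStep (c : Int) (best : Option (Int × Int)) (it : Int × Int) : Option (Int × Int) :=
  match best with
  | none => if it.1 ≤ c then some it else none
  | some b => if it.1 ≤ c ∧ b.2 < it.2 then some it else some b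

-- B's loop body over one box: find the best fitting item; take it if its value is positive
def bBoxStep (st : List (Int × Int) × Int) (c : Int) : List (Int × Int) × Int :=
  match st.1.foldl (bBestStep c) none with
  | none => st
  | some best =>
      if 0 < best.2 then
        -- items.remove(best): best is an element of the list, so remove? returns the erased list
        ((PySem.List.remove? st.1 best).getD st.1, st.2 + best.2)
      else st

def get_max_value_baggage_alt (baggage : List (Int × Int)) (boxes : List Int) : Int :=
  ((PySem.List.sorted boxes (fun x => x) false).foldl bBoxStep (baggage, 0)).2

-- ===== PRECONDITION & SPEC =====
def Spec_get_max_value_baggage (baggage : List (Int × Int)) (boxes : List Int) (out : Int) : Prop := out = get_max_value_baggage_alt baggage boxes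
instance (baggage : List (Int × Int)) (boxes : List Int) (out : Int) : Decidable (Spec_get_max_value_baggage baggage boxes out) := by unfold Spec_get_max_value_baggage; infer_instance

-- ===== CLAIM (what is proved, stated in full; the proofs are below) =====
def Claim_equal_get_max_value_baggage : Prop := ∀ (baggage : List (Int × Int)) (boxes : List Int), Dom_get_max_value_baggage baggage boxes → Spec_get_max_value_baggage baggage boxes (get_max_value_baggage baggage boxes)

-- ===== LEMMAS AND PROOFS =====

-- ---------- the mathematical DP that A's table computes: dpD bg bx i j = dp[i][j] ----------
def dpD (bg : List (Int × Int)) (bx : List Int) : Nat → Nat → Int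
  | 0, _ => 0
  | _ + 1, 0 => 0
  | i + 1, j + 1 =>
    let wv := bg.getD i ((0 : Int), (0 : Int))
    let c := bx.getD j 0
    if c ≥ wv.1 then max (dpD bg bx i (j + 1)) (dpD bg bx i j + wv.2)
    else dpD bg bx i (j + 1)

theorem dpD_zero_right (bg : List (Int × Int)) (bx : List Int) (i : Nat) : dpD bg bx i 0 = 0 := by
  cases i <;> rfl

-- row i of the finished table
def rowD (bg : List (Int × Int)) (bx : List Int) (i : Nat) : List Int :=
  (List.range (bx.length + 1)).map (dpD bg bx i)

theorem map_range_set {α : Type} (N t : Nat) (f : Nat → α) (x : α) :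
    ((List.range N).map f).set t x = (List.range N).map (fun r => if r = t then x else f r) := by
  apply List.ext_getElem
  · simp
  · intro r hr hr'
    simp only [List.getElem_set, List.getElem_map, List.getElem_range]
    by_cases h : r = t <;> simp [h]
    omega

-- partially filled row k+1 of A's table (entries 1..l written) and the table state
def prowD (bg : List (Int × Int)) (bx : List Int) (i l : Nat) : List Int :=
  (List.range (bx.length + 1)).map (fun jj => if jj ≤ l then dpD bg bx i jj else 0)
def tblD (bg : List (Int × Int)) (bx : List Int) (k : Nat) : List (List Int) :=
  (List.range (bg.length + 1)).map (fun r => if r ≤ k then rowD bg bx r else rowD bg bx 0)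
def ptblD (bg : List (Int × Int)) (bx : List Int) (k l : Nat) : List (List Int) :=
  (List.range (bg.length + 1)).map
    (fun r => if r ≤ k then rowD bg bx r else if r = k + 1 then prowD bg bx (k + 1) l else rowD bg bx 0)

theorem rowD_zero (bg : List (Int × Int)) (bx : List Int) (i : Nat) :
    prowD bg bx i 0 = rowD bg bx 0 := by
  apply List.ext_getElem
  · simp [prowD, rowD]
  · intro jj h1 h2
    simp only [prowD, rowD, List.getElem_map, List.getElem_range]
    rcases Nat.eq_zero_or_pos jj with h | h
    · subst h; simp [dpD_zero_right]
    · rw [if_neg (by omega)]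
      show (0 : Int) = dpD bg bx 0 jj
      rfl

theorem prowD_full (bg : List (Int × Int)) (bx : List Int) (i : Nat) :
    prowD bg bx i bx.length = rowD bg bx i := by
  apply List.ext_getElem
  · simp [prowD, rowD]
  · intro jj h1 h2
    simp only [prowD, rowD, List.getElem_map, List.getElem_range]
    rw [if_pos (by simp [prowD] at h1; omega)]

theorem ptblD_zero (bg : List (Int × Int)) (bx : List Int) (k : Nat) :
    ptblD bg bx k 0 = tblD bg bx k := by
  apply List.ext_getElem
  · simp [ptblD, tblD]
  · intro r h1 h2
    simp only [ptblD, tblD, List.getElem_map, List.getElem_range, rowD_zero]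
    split_ifs <;> rfl

theorem ptblD_full (bg : List (Int × Int)) (bx : List Int) (k : Nat) :
    ptblD bg bx k bx.length = tblD bg bx (k + 1) := by
  apply List.ext_getElem
  · simp [ptblD, tblD]
  · intro r h1 h2
    simp only [ptblD, tblD, List.getElem_map, List.getElem_range, prowD_full]
    by_cases ha : r ≤ k
    · rw [if_pos ha, if_pos (by omega)]
    · rw [if_neg ha]
      by_cases hb : r = k + 1
      · rw [if_pos hb, if_pos (by omega), hb]
      · rw [if_neg hb, if_neg (by omega)]

theorem aStep_eq (bg : List (Int × Int)) (bx : List Int) (k l : Nat)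
    (hk : k < bg.length) (hl : l < bx.length) :
    aStep bg bx (ptblD bg bx k l) (1 + (k : Int)) (1 + (l : Int))
      = ptblD bg bx k (l + 1) := by
  have hik : (1 + (k : Int) - 1) = ((k : Nat) : Int) := by omega
  have hjl : (1 + (l : Int) - 1) = ((l : Nat) : Int) := by omega
  have hic : (1 + (k : Int)) = (((k + 1 : Nat)) : Int) := by push_cast; omega
  have hjc : (1 + (l : Int)) = (((l + 1 : Nat)) : Int) := by push_cast; omega
  have hprev : PySem.List.pyGetD (ptblD bg bx k l) ((k : Nat) : Int) [] = rowD bg bx k := by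
    rw [PySem.List.pyGetD_natCast, ptblD, PySem.List.getD_map_range _ _ _ _ (by omega)]
    simp
  have hrowcur : PySem.List.pyGetD (ptblD bg bx k l) (((k + 1 : Nat)) : Int) []
      = prowD bg bx (k + 1) l := by
    rw [PySem.List.pyGetD_natCast, ptblD, PySem.List.getD_map_range _ _ _ _ (by omega)]
    rw [if_neg (by omega), if_pos rfl]
  have hget1 : PySem.List.pyGetD (rowD bg bx k) (((l + 1 : Nat)) : Int) 0 = dpD bg bx k (l + 1) := by
    rw [PySem.List.pyGetD_natCast, rowD, PySem.List.getD_map_range _ _ _ _ (by omega)]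
  have hget0 : PySem.List.pyGetD (rowD bg bx k) (((l : Nat)) : Int) 0 = dpD bg bx k l := by
    rw [PySem.List.pyGetD_natCast, rowD, PySem.List.getD_map_range _ _ _ _ (by omega)]
  have hrec : dpD bg bx (k + 1) (l + 1)
      = if bx.getD l 0 ≥ (bg.getD k ((0 : Int), (0 : Int))).1 then
          max (dpD bg bx k (l + 1)) (dpD bg bx k l + (bg.getD k ((0 : Int), (0 : Int))).2)
        else dpD bg bx k (l + 1) := rfl
  simp only [aStep]
  rw [hik, hjl]
  rw [hprev]
  conv_lhs => rw [hjc, hic]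
  rw [hget1, hget0, hrowcur]
  rw [PySem.List.pyGetD_natCast bg, PySem.List.pyGetD_natCast bx]
  rw [PySem.List.pySetD_natCast, PySem.List.pySetD_natCast]
  rw [← hrec]
  have hsetrow : (prowD bg bx (k + 1) l).set (l + 1) (dpD bg bx (k + 1) (l + 1))
      = prowD bg bx (k + 1) (l + 1) := by
    unfold prowD
    rw [map_range_set]
    apply List.ext_getElem
    · simp
    · intro jj h1 h2
      simp only [List.getElem_map, List.getElem_range]
      by_cases hj : jj = l + 1
      · subst hj
        rw [if_pos rfl, if_pos (le_refl _)]
      · rw [if_neg hj]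
        by_cases hj2 : jj ≤ l
        · rw [if_pos hj2, if_pos (by omega)]
        · rw [if_neg hj2, if_neg (by omega)]
  rw [hsetrow]
  unfold ptblD
  rw [map_range_set]
  apply List.ext_getElem
  · simp
  · intro r h1 h2
    simp only [List.getElem_map, List.getElem_range]
    by_cases hr : r = k + 1
    · rw [if_pos hr, if_neg (by omega), if_pos hr]
    · rw [if_neg hr]
      by_cases hr2 : r ≤ k
      · rw [if_pos hr2, if_pos hr2]
      · rw [if_neg hr2, if_neg hr, if_neg hr2, if_neg hr]

theorem innerfold (bg : List (Int × Int)) (bx : List Int) (k : Nat) (hk : k < bg.length) :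
    ∀ (lcount : Nat), lcount ≤ bx.length →
      (List.range lcount).foldl (fun dp (t : Nat) => aStep bg bx dp (1 + (k : Int)) (1 + (t : Int)))
        (ptblD bg bx k 0) = ptblD bg bx k lcount := by
  intro lcount
  induction lcount with
  | zero => intro _; simp
  | succ l ih =>
    intro hl
    rw [List.range_succ, List.foldl_append, ih (by omega), List.foldl_cons, List.foldl_nil]
    exact aStep_eq bg bx k l hk (by omega)

theorem outerfold (bg : List (Int × Int)) (bx : List Int) :
    ∀ (kcount : Nat), kcount ≤ bg.length →
      (List.range kcount).foldl
        (fun dp (t : Nat) =>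
          (List.range bx.length).foldl
            (fun dp (u : Nat) => aStep bg bx dp (1 + (t : Int)) (1 + (u : Int))) dp)
        (tblD bg bx 0) = tblD bg bx kcount := by
  intro kcount
  induction kcount with
  | zero => intro _; simp
  | succ k ih =>
    intro hk
    rw [List.range_succ, List.foldl_append, ih (by omega), List.foldl_cons, List.foldl_nil]
    rw [← ptblD_zero, innerfold bg bx k (by omega) bx.length (le_refl _), ptblD_full]

theorem foldl_core_eq (bg : List (Int × Int)) (bx : List Int) :
    PySem.List.pyGetD (PySem.List.pyGetD (aTable bg bx) (-1) []) (-1) 0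
      = dpD bg bx bg.length bx.length := by
  have htab : aTable bg bx = tblD bg bx bg.length := by
    unfold aTable
    simp only [PySem.List.len_eq, PySem.List.pyRange_one, List.foldl_map, List.map_map]
    have h1 : (((bg.length : Int) + 1 - 1)).toNat = bg.length := by omega
    have h2 : (((bx.length : Int) + 1 - 1)).toNat = bx.length := by omega
    have h3 : (((bg.length : Int) + 1 - 0)).toNat = bg.length + 1 := by omega
    have h4 : (((bx.length : Int) + 1 - 0)).toNat = bx.length + 1 := by omega
    rw [h1, h2, h3, h4]
    have hdp0 : List.map ((fun (_ : Int) => List.map ((fun (_ : Int) => (0 : Int)) ∘ fun (k : Nat) => (0 : Int) + (k : Int)) (List.range (bx.length + 1))) ∘ fun (k : Nat) => (0 : Int) + (k : Int)) (List.range (bg.length + 1))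
        = tblD bg bx 0 := by
      apply List.ext_getElem
      · simp [tblD]
      · intro r hr hr'
        simp only [tblD, List.getElem_map, List.getElem_range, Function.comp]
        have : (if r ≤ 0 then rowD bg bx r else rowD bg bx 0) = rowD bg bx 0 := by
          rcases Nat.eq_zero_or_pos r with h | h
          · subst h; rw [if_pos (le_refl _)]
          · rw [if_neg (by omega)]
        rw [this]
        apply List.ext_getElem
        · simp [rowD]
        · intro jj h1 h2
          simp only [rowD, List.getElem_map, List.getElem_range]
          rfl
    rw [hdp0]
    exact outerfold bg bx bg.length (le_refl _)
  rw [htab]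
  unfold tblD
  rw [List.range_succ, List.map_append]
  simp only [List.map_cons, List.map_nil, PySem.List.pyGetD_neg_one_append_singleton]
  rw [if_pos (le_refl _)]
  unfold rowD
  rw [List.range_succ, List.map_append]
  simp only [List.map_cons, List.map_nil, PySem.List.pyGetD_neg_one_append_singleton]

-- ---------- generic "fold of max over guarded candidates" ----------
def fmax {α : Type} (p : α → Bool) (g : α → Int) (a0 : Int) : List α → Int
  | [] => a0
  | y :: l => fmax p g (if p y then max a0 (g y) else a0) l

theorem fmax_le_iff {α : Type} (p : α → Bool) (g : α → Int) (z : Int) :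
    ∀ (l : List α) (a0 : Int), fmax p g a0 l ≤ z ↔ a0 ≤ z ∧ ∀ y ∈ l, p y → g y ≤ z := by
  intro l
  induction l with
  | nil => intro a0; simp [fmax]
  | cons y l ih =>
    intro a0
    simp only [fmax, ih, List.mem_cons]
    by_cases hp : p y
    · rw [if_pos hp]
      constructor
      · rintro ⟨h1, h2⟩
        refine ⟨by simp at h1; omega, ?_⟩
        rintro y' (rfl | hy') hp'
        · simp at h1; omega
        · exact h2 y' hy' hp'
      · rintro ⟨h1, h2⟩
        refine ⟨?_, fun y' hy' hp' => h2 y' (Or.inr hy') hp'⟩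
        have := h2 y (Or.inl rfl) hp
        simp; omega
    · rw [if_neg hp]
      constructor
      · rintro ⟨h1, h2⟩
        refine ⟨h1, ?_⟩
        rintro y' (rfl | hy') hp'
        · exact absurd hp' hp
        · exact h2 y' hy' hp'
      · rintro ⟨h1, h2⟩
        exact ⟨h1, fun y' hy' hp' => h2 y' (Or.inr hy') hp'⟩

theorem le_fmax_init {α : Type} (p : α → Bool) (g : α → Int) (a0 : Int) (l : List α) :
    a0 ≤ fmax p g a0 l :=
  ((fmax_le_iff p g _ l a0).mp (le_refl _)).1

theorem le_fmax_mem {α : Type} (p : α → Bool) (g : α → Int) (a0 : Int) {l : List α} {y : α}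
    (hy : y ∈ l) (hp : p y) : g y ≤ fmax p g a0 l :=
  ((fmax_le_iff p g _ l a0).mp (le_refl _)).2 y hy hp

theorem fmax_congr {α : Type} (p p' : α → Bool) (g g' : α → Int) :
    ∀ (l : List α) (a0 a0' : Int), a0 = a0' → (∀ y ∈ l, p y = p' y) →
      (∀ y ∈ l, p y → g y = g' y) → fmax p g a0 l = fmax p' g' a0' l := by
  intro l
  induction l with
  | nil => intro a0 a0' h _ _; exact h
  | cons y l ih =>
    intro a0 a0' h hp hg
    simp only [fmax]
    apply ih
    · rw [hp y (by simp), h]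
      by_cases hpy : p' y
      · rw [if_pos hpy, if_pos hpy]
        rw [← hg y (by simp) (by rw [hp y (by simp)]; exact hpy)]
      · rw [if_neg hpy, if_neg hpy]
    · exact fun y' hy' => hp y' (by simp [hy'])
    · exact fun y' hy' => hg y' (by simp [hy'])

theorem fmax_eq_foldl {α : Type} (p : α → Bool) (g : α → Int) :
    ∀ (l : List α) (a0 : Int), fmax p g a0 l = l.foldl (fun acc y => if p y then max acc (g y) else acc) a0 := by
  intro l
  induction l with
  | nil => intro a0; rfl
  | cons y l ih => intro a0; simp only [fmax, List.foldl_cons, ih]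

theorem fmax_perm {α : Type} [DecidableEq α] (p : α → Bool) (g : α → Int) (a0 : Int)
    {l l' : List α} (h : List.Perm l l') : fmax p g a0 l = fmax p g a0 l' := by
  rw [fmax_eq_foldl, fmax_eq_foldl]
  induction h generalizing a0 with
  | nil => rfl
  | cons x h ih => simp only [List.foldl_cons]; exact ih _
  | swap x y l =>
    simp only [List.foldl_cons]
    congr 1
    by_cases hx : p x <;> by_cases hy : p y <;> simp [hx, hy, max_right_comm]
  | trans h1 h2 ih1 ih2 => rw [ih1, ih2]

-- ---------- the true optimum: boxes processed front-first, each takes any fitting item ----------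
def opt : List Int → List (Int × Int) → Int
  | [], _ => 0
  | c :: bs, its =>
      fmax (fun y => decide (y.1 ≤ c)) (fun y => y.2 + opt bs (its.erase y)) (opt bs its) its

theorem opt_nil_items : ∀ (bs : List Int), opt bs [] = 0 := by
  intro bs
  induction bs with
  | nil => rfl
  | cons c bs ih => simp only [opt, fmax, ih]

theorem opt_nonneg : ∀ (bs : List Int) (its : List (Int × Int)), 0 ≤ opt bs its := by
  intro bs
  induction bs with
  | nil => intro its; exact le_refl 0
  | cons c bs ih => intro its; exact le_trans (ih its) (le_fmax_init _ _ _ _)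

theorem opt_cons_le_iff (c : Int) (bs : List Int) (its : List (Int × Int)) (z : Int) :
    opt (c :: bs) its ≤ z ↔
      opt bs its ≤ z ∧ ∀ y ∈ its, y.1 ≤ c → y.2 + opt bs (its.erase y) ≤ z := by
  show fmax _ _ _ _ ≤ z ↔ _
  rw [fmax_le_iff]
  simp only [decide_eq_true_eq]

theorem le_opt_cons_skip (c : Int) (bs : List Int) (its : List (Int × Int)) :
    opt bs its ≤ opt (c :: bs) its :=
  le_fmax_init _ _ _ _

theorem le_opt_cons_take (c : Int) (bs : List Int) {its : List (Int × Int)} {y : Int × Int}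
    (hy : y ∈ its) (hfit : y.1 ≤ c) : y.2 + opt bs (its.erase y) ≤ opt (c :: bs) its :=
  le_fmax_mem _ _ _ hy (by simpa using hfit)

-- opt depends on the items only through their multiset
theorem opt_perm : ∀ (bs : List Int) {its its' : List (Int × Int)},
    List.Perm its its' → opt bs its = opt bs its' := by
  intro bs
  induction bs with
  | nil => intro its its' _; rfl
  | cons c bs ih =>
    intro its its' h
    show fmax _ _ _ _ = fmax _ _ _ _
    rw [fmax_congr (fun y => decide (y.1 ≤ c)) (fun y => decide (y.1 ≤ c))
      (fun y => y.2 + opt bs (its.erase y)) (fun y => y.2 + opt bs (its'.erase y))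
      its (opt bs its) (opt bs its') (ih h) (fun _ _ => rfl)
      (fun y _ _ => by show y.2 + opt bs (its.erase y) = y.2 + opt bs (its'.erase y); rw [ih (h.erase y)])]
    exact fmax_perm _ _ _ h

-- opt is monotone in the item list (sublists)
theorem opt_sublist : ∀ (bs : List Int) {its1 its2 : List (Int × Int)},
    List.Sublist its1 its2 → opt bs its1 ≤ opt bs its2 := by
  intro bs
  induction bs with
  | nil => intro _ _ _; exact le_refl 0
  | cons c bs ih =>
    intro its1 its2 hs
    rw [opt_cons_le_iff]
    refine ⟨le_trans (ih hs) (le_opt_cons_skip _ _ _), fun y hy hfit => ?_⟩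
    exact le_trans (by have := ih (hs.erase y); omega) (le_opt_cons_take c bs (hs.subset hy) hfit)

theorem opt_erase_le (bs : List Int) (its : List (Int × Int)) (y : Int × Int) :
    opt bs (its.erase y) ≤ opt bs its :=
  opt_sublist bs List.erase_sublist

-- if every item fits every box, opt depends only on the number of boxes
theorem opt_allfit : ∀ (bs1 bs2 : List Int) (its : List (Int × Int)),
    bs1.length = bs2.length →
    (∀ y ∈ its, ∀ b ∈ bs1, y.1 ≤ b) → (∀ y ∈ its, ∀ b ∈ bs2, y.1 ≤ b) →
    opt bs1 its = opt bs2 its := by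
  intro bs1
  induction bs1 with
  | nil => intro bs2 its hlen _ _; cases bs2 with
    | nil => rfl
    | cons _ _ => simp at hlen
  | cons c bs1 ih =>
    intro bs2 its hlen h1 h2
    cases bs2 with
    | nil => simp at hlen
    | cons d bs2 =>
      show fmax _ _ _ _ = fmax _ _ _ _
      apply fmax_congr
      · exact ih bs2 its (by simpa using hlen)
          (fun y hy b hb => h1 y hy b (by simp [hb]))
          (fun y hy b hb => h2 y hy b (by simp [hb]))
      · intro y hy
        simp [h1 y hy c (by simp), h2 y hy d (by simp)]
      · intro y hy _
        congr 1
        exact ih bs2 (its.erase y) (by simpa using hlen)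
          (fun y' hy' b hb => h1 y' (List.erase_subset hy') b (by simp [hb]))
          (fun y' hy' b hb => h2 y' (List.erase_subset hy') b (by simp [hb]))

-- deleting one item costs at most its (positive part of) value
theorem opt_erase_ge : ∀ (bs : List Int) {its : List (Int × Int)} {p : Int × Int},
    p ∈ its → opt bs its ≤ max p.2 0 + opt bs (its.erase p) := by
  intro bs
  induction bs with
  | nil => intro its p _; simp [opt]
  | cons c bs ih =>
    intro its p hp
    rw [opt_cons_le_iff]
    constructor
    · have h1 := ih (its := its) hp
      have h2 := le_opt_cons_skip c bs (its.erase p)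
      omega
    · intro y hy hfit
      by_cases hyp : y = p
      · subst hyp
        have := le_opt_cons_skip c bs (its.erase y)
        have : opt bs (its.erase y) ≤ opt (c :: bs) (its.erase y) := this
        omega
      · have hpy : p ∈ its.erase y := (List.mem_erase_of_ne (fun h => hyp h.symm)).mpr hp
        have h1 := ih (its := its.erase y) hpy
        rw [List.erase_comm] at h1
        have h2 := le_opt_cons_take c bs
          ((List.mem_erase_of_ne hyp).mpr hy) hfit
        omega

-- swapping a used item for an unused one of no smaller value (both fitting everywhere) helps
theorem opt_swap : ∀ (bs : List Int) {its : List (Int × Int)} {p y : Int × Int},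
    p ∈ its → y ∈ its → p ≠ y → y.2 ≤ p.2 →
    (∀ b ∈ bs, p.1 ≤ b) → (∀ b ∈ bs, y.1 ≤ b) →
    y.2 + opt bs (its.erase y) ≤ p.2 + opt bs (its.erase p) := by
  intro bs
  induction bs with
  | nil => intro its p y _ _ _ hv _ _; simp [opt]; omega
  | cons c bs ih =>
    intro its p y hp hy hne hv hpfit hyfit
    have hyc : y.1 ≤ c := hyfit c (by simp)
    have hpc : p.1 ≤ c := hpfit c (by simp)
    have hkey : opt (c :: bs) (its.erase y) ≤ p.2 + opt (c :: bs) (its.erase p) - y.2 := by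
      rw [opt_cons_le_iff]
      constructor
      · -- skip branch
        have h1 := ih (its := its) hp hy hne hv
          (fun b hb => hpfit b (by simp [hb])) (fun b hb => hyfit b (by simp [hb]))
        have h2 := le_opt_cons_skip c bs (its.erase p)
        omega
      · intro z hz hzfit
        by_cases hzp : z = p
        · subst hzp
          rw [List.erase_comm]
          have h2 := le_opt_cons_take c bs
            ((List.mem_erase_of_ne (fun h => hne h.symm)).mpr hy) hyc
          omega
        · by_cases hzy : z = y
          · subst hzy
            -- z = y: a duplicate of y sits in its.erase y
            have h1 := ih (its := its.erase z)
              ((List.mem_erase_of_ne hne).mpr hp) hz hne hv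
              (fun b hb => hpfit b (by simp [hb])) (fun b hb => hyfit b (by simp [hb]))
            rw [List.erase_comm z p] at h1
            have h2 := le_opt_cons_take c bs
              ((List.mem_erase_of_ne hzp).mpr (List.erase_subset hz)) hzfit
            omega
          · have hpz : p ∈ its.erase z := (List.mem_erase_of_ne (fun h => hzp h.symm)).mpr hp
            have hyz : y ∈ its.erase z := (List.mem_erase_of_ne (fun h => hzy h.symm)).mpr hy
            have h1 := ih (its := its.erase z) hpz hyz hne hv
              (fun b hb => hpfit b (by simp [hb])) (fun b hb => hyfit b (by simp [hb]))
            rw [List.erase_comm z y, List.erase_comm z p] at h1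
            have h2 := le_opt_cons_take c bs
              ((List.mem_erase_of_ne hzp).mpr (List.erase_subset hz)) hzfit
            omega
    omega

-- an item fitting the extra last box can always be granted it
theorem opt_last_box : ∀ (B : List Int) {its : List (Int × Int)} {x : Int × Int} (c : Int),
    x ∈ its → x.1 ≤ c → x.2 + opt B (its.erase x) ≤ opt (B ++ [c]) its := by
  intro B
  induction B with
  | nil =>
    intro its x c hx hfit
    simpa [opt] using le_opt_cons_take c [] hx hfit
  | cons b B ih =>
    intro its x c hx hfit
    rw [List.cons_append]
    have hkey : opt (b :: B) (its.erase x) ≤ opt (b :: (B ++ [c])) its - x.2 := by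
      rw [opt_cons_le_iff]
      constructor
      · have h1 := ih (its := its) c hx hfit
        have h2 := le_opt_cons_skip b (B ++ [c]) its
        omega
      · intro z hz hzfit
        have hxz : x ∈ its.erase z := by
          by_cases hzx : z = x
          · exact hzx ▸ hz
          · exact (List.mem_erase_of_ne (fun h => hzx h.symm)).mpr hx
        have h1 := ih (its := its.erase z) c hxz hfit
        rw [List.erase_comm z x] at h1
        have h2 := le_opt_cons_take b (B ++ [c]) (List.erase_subset hz) hzfit
        omega
    omega

-- an item too heavy for every box can be dropped
theorem opt_drop_heavy : ∀ (bs : List Int) {its : List (Int × Int)} {x : Int × Int},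
    (∀ b ∈ bs, b < x.1) → opt bs (its ++ [x]) = opt bs its := by
  intro bs
  induction bs with
  | nil => intro its x _; rfl
  | cons c bs ih =>
    intro its x hheavy
    show fmax _ _ _ (its ++ [x]) = fmax _ _ _ its
    have hxc : ¬ (x.1 ≤ c) := by have := hheavy c (by simp); omega
    have happ : ∀ (a0 : Int), fmax (fun y => decide (y.1 ≤ c))
        (fun y => y.2 + opt bs ((its ++ [x]).erase y)) a0 (its ++ [x])
        = fmax (fun y => decide (y.1 ≤ c))
        (fun y => y.2 + opt bs ((its ++ [x]).erase y)) a0 its := by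
      intro a0
      rw [fmax_eq_foldl, fmax_eq_foldl, List.foldl_append]
      simp [hxc]
    rw [happ]
    apply fmax_congr
    · exact ih (fun b hb => hheavy b (by simp [hb]))
    · intro y hy; rfl
    · intro y hy _
      rw [List.erase_append_left _ hy, ih (fun b hb => hheavy b (by simp [hb]))]

theorem erase_append_singleton_perm {x : Int × Int} (I : List (Int × Int)) :
    List.Perm ((I ++ [x]).erase x) I := by
  by_cases hx : x ∈ I
  · rw [List.erase_append_left _ hx]
    exact List.Perm.trans (List.perm_append_singleton x (I.erase x))
      (List.perm_cons_erase hx).symm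
  · rw [List.erase_append_right _ hx]
    simp

-- upper bound: the heaviest item either skips or (wlog) takes the biggest box
theorem opt_extend_le : ∀ (B : List Int) {I : List (Int × Int)} {x : Int × Int} {c : Int},
    (∀ y ∈ I, y.1 ≤ x.1) → x.1 ≤ c → (∀ b ∈ B, b ≤ c) → B.Pairwise (· ≤ ·) →
    opt (B ++ [c]) (I ++ [x]) ≤ max (opt (B ++ [c]) I) (x.2 + opt B I) := by
  intro B
  induction B with
  | nil =>
    intro I x c hI hx _ _
    rw [List.nil_append, opt_cons_le_iff]
    constructor
    · exact le_trans (opt_nonneg [c] I) (le_max_left _ _)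
    · intro y hy hfit
      rcases List.mem_append.mp hy with hyI | hyx
      · have h := le_opt_cons_take c [] (its := I) hyI hfit
        exact le_trans (show y.2 + opt [] ((I ++ [x]).erase y) ≤ opt [c] I from h) (le_max_left _ _)
      · simp at hyx
        subst hyx
        exact le_max_right _ _
  | cons b B ih =>
    intro I x c hI hx hBc hBs
    have hbB : ∀ b' ∈ B, b ≤ b' := fun b' hb' => (List.pairwise_cons.mp hBs).1 b' hb'
    rw [List.cons_append, opt_cons_le_iff]
    constructor
    · have h1 := ih (I := I) (x := x) (c := c) hI hx
        (fun b' hb' => hBc b' (by simp [hb'])) ((List.pairwise_cons.mp hBs).2)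
      have h2 := le_opt_cons_skip b (B ++ [c]) I
      have h3 := le_opt_cons_skip b B I
      omega
    · intro y hy hfit
      rcases List.mem_append.mp hy with hyI | hyx
      · rw [List.erase_append_left _ hyI]
        have h1 := ih (I := I.erase y) (x := x) (c := c)
          (fun y' hy' => hI y' (List.erase_subset hy')) hx
          (fun b' hb' => hBc b' (by simp [hb'])) ((List.pairwise_cons.mp hBs).2)
        have h2 := le_opt_cons_take b (B ++ [c]) hyI hfit
        have h3 := le_opt_cons_take b B hyI hfit
        omega
      · simp at hyx
        subst hyx
        -- y = x fits the smallest box b, hence every item fits every box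
        have hallfit : opt (B ++ [c]) I = opt (b :: B) I := by
          apply opt_allfit
          · simp
          · intro y' hy' b' hb'
            rcases List.mem_append.mp hb' with h | h
            · exact le_trans (le_trans (hI y' hy') hfit) (hbB b' h)
            · simp at h; subst h; exact le_trans (hI y' hy') hx
          · intro y' hy' b' hb'
            rcases List.mem_cons.mp hb' with h | h
            · subst h; exact le_trans (hI y' hy') hfit
            · exact le_trans (le_trans (hI y' hy') hfit) (hbB b' h)
        have hperm := opt_perm (B ++ [c]) (erase_append_singleton_perm (x := y) I)
        rw [hperm, hallfit]
        exact le_trans (le_refl _) (le_max_right _ _)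

-- the DP recurrence step, stated for opt
theorem opt_extend (B : List Int) (I : List (Int × Int)) (x : Int × Int) (c : Int)
    (hI : ∀ y ∈ I, y.1 ≤ x.1) (hBc : ∀ b ∈ B, b ≤ c) (hBs : B.Pairwise (· ≤ ·)) :
    opt (B ++ [c]) (I ++ [x]) =
      if c ≥ x.1 then max (opt (B ++ [c]) I) (x.2 + opt B I) else opt (B ++ [c]) I := by
  by_cases hfit : c ≥ x.1
  · rw [if_pos hfit]
    apply le_antisymm
    · exact opt_extend_le B hI hfit hBc hBs
    · apply max_le
      · exact opt_sublist _ (List.sublist_append_left I [x])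
      · have h1 := opt_last_box B c (its := I ++ [x]) (x := x) (by simp) hfit
        rw [opt_perm B (erase_append_singleton_perm I)] at h1
        exact h1
  · rw [if_neg hfit]
    apply opt_drop_heavy
    intro b hb
    rcases List.mem_append.mp hb with h | h
    · have := hBc b h; omega
    · simp at h; subst h; omega

theorem pairwise_take_getElem {α : Type} (R : α → α → Prop) (l : List α) (n : Nat)
    (hn : n < l.length) (hp : l.Pairwise R) : ∀ y ∈ l.take n, R y l[n] := by
  intro y hy
  obtain ⟨k, hk, hky⟩ := List.getElem_of_mem hy
  have hkn : k < n := by simp at hk; omega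
  rw [List.getElem_take] at hky
  subst hky
  exact List.pairwise_iff_getElem.mp hp k n (by omega) hn hkn

theorem take_succ_getElem {α : Type} (l : List α) (n : Nat) (h : n < l.length) :
    l.take (n + 1) = l.take n ++ [l[n]] := by
  rw [List.take_add_one]
  simp [List.getElem?_eq_getElem h]

-- A's DP equals opt on sorted lists
theorem dpD_eq_opt (its : List (Int × Int)) (bxs : List Int)
    (hits : its.Pairwise (fun a b => a.1 ≤ b.1)) (hbxs : bxs.Pairwise (· ≤ ·)) :
    ∀ (i : Nat), i ≤ its.length → ∀ (j : Nat), j ≤ bxs.length →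
      dpD its bxs i j = opt (bxs.take j) (its.take i) := by
  intro i
  induction i with
  | zero =>
    intro _ j _
    simp [dpD, opt_nil_items]
  | succ i ih =>
    intro hi j hj
    cases j with
    | zero => rw [dpD_zero_right]; rfl
    | succ j =>
      have hi' : i < its.length := by omega
      have hj' : j < bxs.length := by omega
      have hgetx : its.getD i ((0 : Int), (0 : Int)) = its[i] := by
        rw [List.getD_eq_getElem?_getD, List.getElem?_eq_getElem hi']
        rfl
      have hgetc : bxs.getD j 0 = bxs[j] := by
        rw [List.getD_eq_getElem?_getD, List.getElem?_eq_getElem hj']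
        rfl
      have hrec : dpD its bxs (i + 1) (j + 1)
          = if bxs.getD j 0 ≥ (its.getD i ((0 : Int), (0 : Int))).1 then
              max (dpD its bxs i (j + 1)) (dpD its bxs i j + (its.getD i ((0 : Int), (0 : Int))).2)
            else dpD its bxs i (j + 1) := rfl
      rw [hrec, hgetx, hgetc]
      rw [take_succ_getElem its i hi', take_succ_getElem bxs j hj']
      rw [opt_extend (bxs.take j) (its.take i) its[i] bxs[j]
        (pairwise_take_getElem _ its i hi' hits)
        (pairwise_take_getElem _ bxs j hj' hbxs)
        (hbxs.sublist (List.take_sublist j bxs))]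
      rw [ih (by omega) (j + 1) hj, ih (by omega) j (by omega)]
      rw [take_succ_getElem bxs j hj']
      by_cases hfit : bxs[j] ≥ its[i].1
      · rw [if_pos hfit, if_pos hfit]
        omega
      · rw [if_neg hfit, if_neg hfit]

-- ---------- B's greedy equals opt ----------
theorem bBest_some_spec (c : Int) :
    ∀ (its : List (Int × Int)) (acc : Option (Int × Int)) (p : Int × Int),
      its.foldl (bBestStep c) acc = some p →
      (some p = acc ∨ (p ∈ its ∧ p.1 ≤ c)) ∧
      (∀ y ∈ its, y.1 ≤ c → y.2 ≤ p.2) ∧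
      (∀ a, acc = some a → a.2 ≤ p.2) := by
  intro its
  induction its with
  | nil =>
    intro acc p h
    simp only [List.foldl_nil] at h
    subst h
    exact ⟨Or.inl rfl, by simp, fun a ha => by cases ha; exact le_refl _⟩
  | cons it its ih =>
    intro acc p h
    rw [List.foldl_cons] at h
    obtain ⟨h1, h2, h3⟩ := ih (bBestStep c acc it) p h
    have hstep_cases : bBestStep c acc it = some it ∨ bBestStep c acc it = acc := by
      cases acc with
      | none => simp only [bBestStep]; split <;> simp
      | some a => simp only [bBestStep]; split <;> simp
    have hhead : it.1 ≤ c → it.2 ≤ p.2 := by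
      intro hfit
      cases hacc : acc with
      | none =>
        apply h3
        rw [hacc]; simp [bBestStep, hfit]
      | some a =>
        by_cases hlt : a.2 < it.2
        · apply h3
          rw [hacc]; simp [bBestStep, hfit, hlt]
        · have ha : a.2 ≤ p.2 := by
            apply h3
            rw [hacc]; simp [bBestStep, hlt]
          omega
    refine ⟨?_, ?_, ?_⟩
    · rcases h1 with heq | hmem
      · cases hacc : acc with
        | none =>
          rw [hacc] at heq
          simp only [bBestStep] at heq
          split at heq
          · next hfit =>
              injection heq.symm with hpe
              subst hpe
              exact Or.inr ⟨by simp, hfit⟩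
          · exact absurd heq (by simp)
        | some a =>
          rw [hacc] at heq
          simp only [bBestStep] at heq
          split at heq
          · next hcond =>
              injection heq.symm with hpe
              subst hpe
              exact Or.inr ⟨by simp, hcond.1⟩
          · injection heq.symm with hpe
            subst hpe
            exact Or.inl rfl
      · exact Or.inr ⟨by simp [hmem.1], hmem.2⟩
    · intro y hy hfit
      rcases List.mem_cons.mp hy with rfl | hy'
      · exact hhead hfit
      · exact h2 y hy' hfit
    · intro a ha
      rcases hstep_cases with hs | hs
      · have hit : it.2 ≤ p.2 := h3 it hs
        rw [ha] at hs
        simp only [bBestStep] at hs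
        by_cases hcond : it.1 ≤ c ∧ a.2 < it.2
        · omega
        · rw [if_neg hcond] at hs
          injection hs with hae
          exact hae ▸ hit
      · exact h3 a (hs.trans ha)

theorem bBest_none_spec (c : Int) :
    ∀ (its : List (Int × Int)) (acc : Option (Int × Int)),
      its.foldl (bBestStep c) acc = none → acc = none ∧ ∀ y ∈ its, ¬ (y.1 ≤ c) := by
  intro its
  induction its with
  | nil => intro acc h; simp at h; exact ⟨h, by simp⟩
  | cons it its ih =>
    intro acc h
    rw [List.foldl_cons] at h
    obtain ⟨h1, h2⟩ := ih (bBestStep c acc it) h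
    cases acc with
    | none =>
      refine ⟨rfl, ?_⟩
      intro y hy
      rcases List.mem_cons.mp hy with rfl | hy'
      · intro hfit
        simp [bBestStep, hfit] at h1
      · exact h2 y hy'
    | some a =>
      exfalso
      simp only [bBestStep] at h1
      split at h1 <;> simp_all

-- greedy step identities for opt
theorem opt_cons_no_fit (c : Int) (bs : List Int) (its : List (Int × Int))
    (h : ∀ y ∈ its, ¬ (y.1 ≤ c)) : opt (c :: bs) its = opt bs its := by
  apply le_antisymm
  · rw [opt_cons_le_iff]
    exact ⟨le_refl _, fun y hy hfit => absurd hfit (h y hy)⟩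
  · exact le_opt_cons_skip c bs its

theorem opt_cons_nonpos (c : Int) (bs : List Int) (its : List (Int × Int)) (p : Int × Int)
    (hmax : ∀ y ∈ its, y.1 ≤ c → y.2 ≤ p.2) (hpneg : p.2 ≤ 0) :
    opt (c :: bs) its = opt bs its := by
  apply le_antisymm
  · rw [opt_cons_le_iff]
    refine ⟨le_refl _, fun y hy hfit => ?_⟩
    have h1 := hmax y hy hfit
    have h2 := opt_erase_le bs its y
    omega
  · exact le_opt_cons_skip c bs its

theorem opt_cons_take_best (c : Int) (bs : List Int) (its : List (Int × Int)) (p : Int × Int)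
    (hp : p ∈ its) (hpfit : p.1 ≤ c) (hmax : ∀ y ∈ its, y.1 ≤ c → y.2 ≤ p.2)
    (hppos : 0 < p.2) (hsorted : ∀ b ∈ bs, c ≤ b) :
    opt (c :: bs) its = p.2 + opt bs (its.erase p) := by
  apply le_antisymm
  · rw [opt_cons_le_iff]
    constructor
    · have := opt_erase_ge bs hp
      have hmx : max p.2 0 = p.2 := by omega
      omega
    · intro y hy hfit
      by_cases hyp : y = p
      · subst hyp; exact le_refl _
      · exact opt_swap bs hp hy (fun h => hyp h.symm) (hmax y hy hfit)
          (fun b hb => le_trans hpfit (hsorted b hb))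
          (fun b hb => le_trans hfit (hsorted b hb))
  · exact le_opt_cons_take c bs hp hpfit

-- the whole greedy fold computes opt (boxes ascending)
theorem greedy_fold_eq_opt :
    ∀ (bxs : List Int), bxs.Pairwise (· ≤ ·) →
      ∀ (its : List (Int × Int)) (tot : Int),
        (bxs.foldl bBoxStep (its, tot)).2 = tot + opt bxs its := by
  intro bxs
  induction bxs with
  | nil => intro _ its tot; simp [opt]
  | cons c bs ih =>
    intro hp its tot
    have hhead : ∀ b ∈ bs, c ≤ b := (List.pairwise_cons.mp hp).1
    have htail := (List.pairwise_cons.mp hp).2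
    rw [List.foldl_cons]
    show (bs.foldl bBoxStep (bBoxStep (its, tot) c)).2 = _
    cases hbest : its.foldl (bBestStep c) none with
    | none =>
      have hnofit := (bBest_none_spec c its none hbest).2
      have hstep : bBoxStep (its, tot) c = (its, tot) := by
        unfold bBoxStep
        rw [hbest]
      rw [hstep, ih htail its tot, opt_cons_no_fit c bs its hnofit]
    | some p =>
      obtain ⟨h1, h2, _⟩ := bBest_some_spec c its none p hbest
      have hpmem : p ∈ its := by
        rcases h1 with h | h
        · simp at h
        · exact h.1
      have hpfit : p.1 ≤ c := by
        rcases h1 with h | h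
        · simp at h
        · exact h.2
      by_cases hppos : 0 < p.2
      · have hstep : bBoxStep (its, tot) c = (its.erase p, tot + p.2) := by
          simp only [bBoxStep]
          rw [hbest]
          simp only [hppos, if_pos]
          rw [PySem.List.remove?_eq_some_erase _ _ hpmem]
          rfl
        rw [hstep, ih htail (its.erase p) (tot + p.2),
          opt_cons_take_best c bs its p hpmem hpfit h2 hppos hhead]
        omega
      · have hstep : bBoxStep (its, tot) c = (its, tot) := by
          simp only [bBoxStep]
          rw [hbest]
          simp [hppos]
        rw [hstep, ih htail its tot, opt_cons_nonpos c bs its p h2 (by omega)]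

-- ===== VERDICT (by name: the statement is the Claim_ definition above) =====
theorem get_max_value_baggage_spec : Claim_equal_get_max_value_baggage := by
  intro baggage boxes _
  unfold Spec_get_max_value_baggage get_max_value_baggage get_max_value_baggage_alt
  simp only []
  rw [foldl_core_eq]
  set its := PySem.List.sorted baggage (fun x => x.1) false with hits
  set bxs := PySem.List.sorted boxes (fun x => x) false with hbxs
  have hsits : its.Pairwise (fun a b => a.1 ≤ b.1) := PySem.List.sorted_pairwise baggage _
  have hsbxs : bxs.Pairwise (· ≤ ·) := PySem.List.sorted_pairwise boxes _
  rw [dpD_eq_opt its bxs hsits hsbxs its.length (le_refl _) bxs.length (le_refl _)]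
  rw [List.take_length, List.take_length]
  rw [greedy_fold_eq_opt bxs hsbxs baggage 0]
  have hperm : List.Perm its baggage := by
    rw [hits]; exact PySem.List.sorted_perm baggage _ _
  rw [opt_perm bxs hperm]
  omega
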